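-- pv_equiv track=rewrite | github.com/cstuartroe/misc | Python/Numberphile/friendly_numbers.py | power_products
-- ===== SOURCE A (Python) =====
-- def power_products(factors, i=0):
--     if i < len(factors):
--         p = factors[i]
--
--         out = set()
--
--         for product in power_products(factors, i+1):
--             out.add(product)
--             out.add(p * product)
--
--         return out
--
--     else:
--         return {1}
-- ===== SOURCE B (Python) =====
-- def power_products(factors, i=0):
--     # Iterative bottom-up version: fold the factors from the innermost (last)
--     # index down to i, expanding each level with a single set comprehension
--     # instead of recursion with explicit set.add calls.
--     out = {1}
--     for j in reversed(range(i, len(factors))):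
--         p = factors[j]
--         out = {y for x in out for y in (x, p * x)}
--     return out
-- ===== Notes on version B (the rewrite author's own statement) =====
-- stated objective: simpler
-- what changed: Replaced A's recursion over the index by a single iterative reversed-index loop whose body expands each level with one set comprehension, removing the recursion (and its depth limit) and the explicit per-element set.add accumulation.
import Mathlib
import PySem

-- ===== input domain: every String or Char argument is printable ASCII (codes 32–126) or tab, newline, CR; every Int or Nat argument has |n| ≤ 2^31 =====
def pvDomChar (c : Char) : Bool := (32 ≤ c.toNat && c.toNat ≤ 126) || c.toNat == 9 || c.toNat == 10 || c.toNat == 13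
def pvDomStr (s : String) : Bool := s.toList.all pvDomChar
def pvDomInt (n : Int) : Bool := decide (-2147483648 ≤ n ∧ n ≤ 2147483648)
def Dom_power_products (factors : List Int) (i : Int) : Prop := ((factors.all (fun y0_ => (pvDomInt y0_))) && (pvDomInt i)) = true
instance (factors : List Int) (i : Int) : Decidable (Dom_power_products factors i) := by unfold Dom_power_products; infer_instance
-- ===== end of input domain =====

-- B replaces A's recursion by a single reversed-index loop whose body expands each
-- level with one set comprehension (objective: simpler / iterative).

-- ===== PORT A =====
def power_products (factors : List Int) (i : Int) : List Int :=
  if _h : i < (factors.length : Int) then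
    let p := PySem.List.pyGetD factors i 0
    (power_products factors (i + 1)).foldl
      (fun out product => PySem.Set.add (PySem.Set.add out product) (p * product))
      PySem.Set.empty
  else
    [1]
termination_by ((factors.length : Int) - i).toNat
decreasing_by omega

-- ===== PORT B =====
def power_products_alt (factors : List Int) (i : Int) : List Int :=
  ((PySem.List.pyRange i (factors.length : Int) 1).reverse).foldl
    (fun out j =>
      let p := PySem.List.pyGetD factors j 0
      PySem.Set.ofList (out.flatMap (fun x => [x, p * x])))
    (PySem.Set.ofList [1])

-- ===== PRECONDITION & SPEC =====
-- Pre_ excludes exactly the inputs where Python A raises IndexError: i < -len(factors).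
def Pre_power_products (factors : List Int) (i : Int) : Prop :=
  -(factors.length : Int) ≤ i
instance (factors : List Int) (i : Int) : Decidable (Pre_power_products factors i) := by
  unfold Pre_power_products; infer_instance
def pvWitness_power_products : List Int × Int := ([2, 3, 2], 0)

def Spec_power_products (factors : List Int) (i : Int) (out : List Int) : Prop := out = power_products_alt factors i
instance (factors : List Int) (i : Int) (out : List Int) : Decidable (Spec_power_products factors i out) := by unfold Spec_power_products; infer_instance

-- ===== CLAIM (what is proved, stated in full; the proofs are below) =====
def Claim_equal_power_products : Prop := ∀ (factors : List Int) (i : Int), Dom_power_products factors i → Pre_power_products factors i → Spec_power_products factors i (power_products factors i)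

-- ===== LEMMAS AND PROOFS =====

-- B's one level step.
def ppStep (factors : List Int) (out : List Int) (j : Int) : List Int :=
  PySem.Set.ofList (out.flatMap (fun x => [x, PySem.List.pyGetD factors j 0 * x]))

-- A's inner loop (two set.adds per element) is a fold of Set.add over the flattened stream.
theorem foldl_add2_eq_flatMap (p : Int) (l s : List Int) :
    l.foldl (fun out x => PySem.Set.add (PySem.Set.add out x) (p * x)) s
      = (l.flatMap (fun x => [x, p * x])).foldl PySem.Set.add s := by
  induction l generalizing s with
  | nil => rfl
  | cons x xs ih => simp [List.foldl, ih]

theorem ppA_eq_loop (factors : List Int) (i : Int) :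
    power_products factors i
      = ((PySem.List.pyRange i (factors.length : Int) 1).reverse).foldl (ppStep factors) [1] := by
  by_cases h : i < (factors.length : Int)
  · rw [power_products, dif_pos h, PySem.List.pyRange_one_cons h]
    have ih := ppA_eq_loop factors (i + 1)
    simp only [List.reverse_cons, List.foldl_append, List.foldl_cons, List.foldl_nil, ← ih,
      foldl_add2_eq_flatMap]
    show _ = ppStep factors (power_products factors (i + 1)) i
    rw [ppStep, PySem.Set.ofList_eq_foldl]
    rfl
  · rw [power_products, dif_neg h, PySem.List.pyRange_one_eq_nil (by omega)]
    rfl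
termination_by ((factors.length : Int) - i).toNat
decreasing_by omega

-- ===== VERDICT (by name: the statement is the Claim_ definition above) =====
theorem power_products_spec : Claim_equal_power_products := by
  intro factors i _ _
  unfold Spec_power_products power_products_alt
  rw [show (fun out j =>
        let p := PySem.List.pyGetD factors j 0
        PySem.Set.ofList (out.flatMap (fun x => [x, p * x]))) = ppStep factors from rfl]
  rw [show PySem.Set.ofList [(1 : Int)] = [1] from rfl]
  exact ppA_eq_loop factors i
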